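-- pv_equiv track=rewrite | github.com/Aly-Hissam1/Phylogenetic-Tree-Construction-Python | SRC/Maximum Parsimony/Maximum parsimony algorithm.py.py | informative
-- ===== SOURCE A (Python) =====
-- def informative (column):
--     c=[]
--     for i in range(len(column)-1):
--         c_num=0
--         for y in range(len(column)-(i+1)):
--             if column[i] == column[-(y+1)]:
--                 c_num += 1
--             else:
--                  continue
--         c.append(str(c_num))
--         del c_num
--     result = 'True'
--     for num in c:
--         if int(num) >1:
--             del result
--             result = "False"
--             break
--         else:
--             continue
--     return (result)
-- ===== SOURCE B (Python) =====
-- def informative(column):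
--     # sort, then one linear scan for a run of 3 equal adjacent elements
--     s = sorted(column)
--     if not s:
--         return 'True'
--     prev = s[0]
--     run = 1
--     for x in s[1:]:
--         if x == prev:
--             run += 1
--             if run == 3:
--                 return 'False'
--         else:
--             prev = x
--             run = 1
--     return 'True'
-- ===== Notes on version B (the rewrite author's own statement) =====
-- stated objective: faster
-- what changed: Replaces the quadratic nested scan that counts each element's later duplicates (via a string-encoded count list) with sort-then-single-scan for a run of three equal adjacent elements, with early exit.
import Mathlib
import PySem

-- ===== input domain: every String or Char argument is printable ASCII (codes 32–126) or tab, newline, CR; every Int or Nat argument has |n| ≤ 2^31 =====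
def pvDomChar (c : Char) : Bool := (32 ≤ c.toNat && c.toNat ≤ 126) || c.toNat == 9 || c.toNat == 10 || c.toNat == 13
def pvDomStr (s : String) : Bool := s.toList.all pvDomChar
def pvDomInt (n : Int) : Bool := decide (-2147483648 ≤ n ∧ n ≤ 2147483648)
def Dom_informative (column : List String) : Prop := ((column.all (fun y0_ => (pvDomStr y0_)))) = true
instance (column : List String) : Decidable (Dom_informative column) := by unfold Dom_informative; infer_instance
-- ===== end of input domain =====

-- B replaces A's quadratic nested duplicate-count with sort + one scan for a run of three equal adjacent elements (asymptotically faster).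

-- ===== PORT A =====
-- hand port of int(num), exact for the strings this program ever parses: every num in
-- the list c is str(c_num) with c_num a nonnegative int, i.e. a nonempty decimal-digit
-- string, and on those Python's int() is exactly this digit fold (sign/space/underscore
-- handling of int() is unreachable here).
def pvParseDigits (s : String) : Int :=
  ((s.toList.foldl (fun a c => a * 10 + (c.toNat - '0'.toNat)) 0 : Nat) : Int)

-- final loop of A: first count > 1 breaks with "False"
def aLoop : List String → String
  | [] => "True"
  | num :: rest => if 1 < pvParseDigits num then "False" else aLoop rest

-- indices i and -(y+1) are always in range for the generated ranges, so pyGetD is exact.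
def informative (column : List String) : String :=
  let c : List String := (PySem.List.pyRange 0 (PySem.List.len column - 1) 1).foldl
    (fun c i =>
      let cnum : Int := (PySem.List.pyRange 0 (PySem.List.len column - (i + 1)) 1).foldl
        (fun cnum y =>
          if PySem.List.pyGetD column i "" = PySem.List.pyGetD column (-(y + 1)) ""
          then cnum + 1 else cnum) 0
      c ++ [PySem.Int.toStr cnum]) []
  aLoop c

-- ===== PORT B =====
-- scan of the sorted list: prev = last element seen, run = length of current run
def bGo : List String → String → Int → String
  | [], _, _ => "True"
  | x :: t, prev, run =>
    if x = prev then
      (if run + 1 = 3 then "False" else bGo t prev (run + 1))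
    else bGo t x 1

def informative_alt (column : List String) : String :=
  match PySem.List.sorted column (fun x => x) false with
  | [] => "True"
  | p :: t => bGo t p 1

-- ===== PRECONDITION & SPEC =====
def Spec_informative (column : List String) (out : String) : Prop := out = informative_alt column
instance (column : List String) (out : String) : Decidable (Spec_informative column out) := by unfold Spec_informative; infer_instance

-- ===== CLAIM (what is proved, stated in full; the proofs are below) =====
def Claim_equal_informative : Prop := ∀ (column : List String), Dom_informative column → Spec_informative column (informative column)

-- ===== LEMMAS AND PROOFS =====

-- ---------- parse (str m) = m, via the decimal-digit list of m ----------
-- decimal digits of n, most significant first (what Nat.toDigits 10 n produces)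
def myDig (n : ℕ) : List Char :=
  if _h : n < 10 then [Nat.digitChar n]
  else myDig (n / 10) ++ [Nat.digitChar (n % 10)]
decreasing_by exact Nat.div_lt_self (by omega) (by omega)

theorem digitChar_val (k : ℕ) (h : k < 10) : (Nat.digitChar k).toNat - '0'.toNat = k := by
  interval_cases k <;> decide

theorem toDigitsCore_eq : ∀ (fuel n : ℕ) (ds : List Char), n < fuel →
    Nat.toDigitsCore 10 fuel n ds = myDig n ++ ds := by
  intro fuel
  induction fuel with
  | zero => intro n ds h; omega
  | succ f ih =>
    intro n ds h
    have hstep : Nat.toDigitsCore 10 (f + 1) n ds =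
        if n / 10 = 0 then Nat.digitChar (n % 10) :: ds
        else Nat.toDigitsCore 10 f (n / 10) (Nat.digitChar (n % 10) :: ds) := rfl
    rw [hstep]
    by_cases h10 : n < 10
    · have hz : n / 10 = 0 := Nat.div_eq_of_lt h10
      rw [if_pos hz]
      rw [show myDig n = [Nat.digitChar n] from by rw [myDig, dif_pos h10]]
      rw [Nat.mod_eq_of_lt h10]
      rfl
    · have h10' : 10 ≤ n := le_of_not_gt h10
      have hz : ¬ (n / 10 = 0) := by
        have : 1 ≤ n / 10 := (Nat.one_le_div_iff (by omega)).mpr h10'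
        omega
      rw [if_neg hz]
      rw [ih (n / 10) _ (by
        have h1 : n / 10 < n := Nat.div_lt_self (by omega) (by omega)
        omega)]
      rw [show myDig n = myDig (n / 10) ++ [Nat.digitChar (n % 10)] from by
        rw [myDig, dif_neg h10]]
      simp

theorem toDigits_eq (m : ℕ) : Nat.toDigits 10 m = myDig m := by
  rw [show Nat.toDigits 10 m = Nat.toDigitsCore 10 (m + 1) m [] from rfl]
  rw [toDigitsCore_eq (m + 1) m [] (by omega)]
  simp

theorem myDig_foldl (n : ℕ) : ∀ acc : ℕ,
    (myDig n).foldl (fun a c => a * 10 + (c.toNat - '0'.toNat)) acc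
      = acc * 10 ^ (myDig n).length + n := by
  induction n using Nat.strong_induction_on with
  | _ n ih =>
    intro acc
    rw [myDig]
    split
    · next h =>
      simp only [List.foldl_cons, List.foldl_nil, List.length_cons, List.length_nil]
      rw [digitChar_val n h, pow_one]
    · next h =>
      rw [List.foldl_append]
      rw [ih (n / 10) (Nat.div_lt_self (by omega) (by omega)) acc]
      simp only [List.foldl_cons, List.foldl_nil, List.length_append, List.length_cons,
        List.length_nil, Nat.zero_add]
      rw [digitChar_val _ (Nat.mod_lt _ (by omega))]
      have hdm : 10 * (n / 10) + n % 10 = n := Nat.div_add_mod n 10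
      calc (acc * 10 ^ (myDig (n / 10)).length + n / 10) * 10 + n % 10
          = acc * (10 ^ (myDig (n / 10)).length * 10) + (10 * (n / 10) + n % 10) := by ring
        _ = acc * 10 ^ ((myDig (n / 10)).length + 1) + n := by rw [hdm, pow_succ]

theorem parse_toStr (m : ℕ) : pvParseDigits (PySem.Int.toStr ((m : ℕ) : ℤ)) = ((m : ℕ) : ℤ) := by
  unfold pvParseDigits
  rw [PySem.Int.toList_toStr]
  have htc : PySem.Int.toChars ((m : ℕ) : ℤ) = Nat.toDigits 10 m := by
    simp [PySem.Int.toChars]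
  rw [htc, toDigits_eq, myDig_foldl m 0]
  simp

-- ---------- A's final loop over the stringified counts ----------
theorem aLoop_map (l : List ℕ) (g : ℕ → ℕ) :
    aLoop (l.map (fun j => PySem.Int.toStr ((g j : ℕ) : ℤ)))
      = if (∃ j ∈ l, 2 ≤ g j) then "False" else "True" := by
  induction l with
  | nil => simp [aLoop]
  | cons j l ih =>
    simp only [List.map_cons, aLoop]
    rw [parse_toStr (g j)]
    by_cases hj : 2 ≤ g j
    · rw [if_pos (by exact_mod_cast hj : (1 : ℤ) < ((g j : ℕ) : ℤ))]
      rw [if_pos ⟨j, by simp, hj⟩]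
    · rw [if_neg (by omega : ¬ (1 : ℤ) < ((g j : ℕ) : ℤ))]
      rw [ih]
      refine if_congr ?_ rfl rfl
      constructor
      · rintro ⟨x, hx, h2⟩
        exact ⟨x, by simp [hx], h2⟩
      · rintro ⟨x, hx, h2⟩
        rcases List.mem_cons.mp hx with rfl | hx'
        · exact absurd h2 hj
        · exact ⟨x, hx', h2⟩

-- ---------- shared characterisation: some element occurs three times ----------
def hasTrip : List String → Bool
  | a :: b :: c :: t => (decide (a = b) && decide (b = c)) || hasTrip (b :: c :: t)
  | _ => false

def trip3 (l : List String) : Bool := l.any (fun x => 3 ≤ l.count x)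

theorem count_cons_le (x a : String) (t : List String) : t.count x ≤ (a :: t).count x := by
  rw [List.count_cons]; split <;> omega

theorem count_cons_ne (x a : String) (t : List String) (h : ¬ a = x) :
    List.count x (a :: t) = List.count x t := by
  rw [List.count_cons, if_neg (by simpa using h), add_zero]

theorem hasTrip_cc (a b : String) (t : List String) :
    (hasTrip (a :: b :: t) = true) ↔ ((a = b ∧ t.head? = some b) ∨ hasTrip (b :: t) = true) := by
  cases t with
  | nil => simp [hasTrip]
  | cons c t' =>
    simp only [hasTrip, Bool.or_eq_true, Bool.and_eq_true, decide_eq_true_eq, List.head?_cons,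
      Option.some.injEq]
    constructor
    · rintro (⟨h1, h2⟩ | h)
      · exact Or.inl ⟨h1, h2.symm⟩
      · exact Or.inr h
    · rintro (⟨h1, h2⟩ | h)
      · exact Or.inl ⟨h1, h2.symm⟩
      · exact Or.inr h

theorem hasTrip_cons_iff (p : String) (t : List String) :
    (hasTrip (p :: t) = true) ↔ (t.take 2 = [p, p] ∨ hasTrip t = true) := by
  cases t with
  | nil => simp [hasTrip]
  | cons c t' =>
    rw [hasTrip_cc]
    cases t' with
    | nil => simp [hasTrip]
    | cons d t'' =>
      simp only [List.head?_cons, Option.some.injEq, List.take_succ_cons, List.take_zero]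
      constructor
      · rintro (⟨h1, h2⟩ | h)
        · subst h1; subst h2
          exact Or.inl (by simp)
        · exact Or.inr h
      · rintro (h | h)
        · simp only [List.cons.injEq, and_true] at h
          obtain ⟨h1, h2⟩ := h
          subst h1
          exact Or.inl ⟨rfl, h2⟩
        · exact Or.inr h

theorem hasTrip_cons' (a : String) (t : List String) (h : hasTrip t = true) :
    hasTrip (a :: t) = true := by
  cases t with
  | nil => simp [hasTrip] at h
  | cons b t' =>
    cases t' with
    | nil => simp [hasTrip] at h
    | cons c t'' =>
      simp only [hasTrip, Bool.or_eq_true]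
      exact Or.inr h

theorem count_of_hasTrip : ∀ (l : List String), hasTrip l = true → ∃ x ∈ l, 3 ≤ l.count x
  | a :: b :: c :: t, h => by
    simp only [hasTrip, Bool.or_eq_true, Bool.and_eq_true, decide_eq_true_eq] at h
    rcases h with ⟨hab, hbc⟩ | h'
    · subst hbc; subst hab
      refine ⟨a, by simp, ?_⟩
      rw [List.count_cons_self, List.count_cons_self, List.count_cons_self]
      omega
    · obtain ⟨x, hx, hc⟩ := count_of_hasTrip (b :: c :: t) h'
      exact ⟨x, List.mem_cons_of_mem a hx, le_trans hc (count_cons_le x a _)⟩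

theorem hasTrip_of_count : ∀ (l : List String) (x : String),
    l.Pairwise (· ≤ ·) → 3 ≤ List.count x l → hasTrip l = true
  | [], _, _, hc => by simp at hc
  | a :: t, x, hp, hc => by
    rw [List.pairwise_cons] at hp
    obtain ⟨ha, ht⟩ := hp
    by_cases hax : a = x
    · subst hax
      have hct : 2 ≤ List.count a t := by
        rw [List.count_cons_self] at hc; omega
      cases t with
      | nil => simp at hct
      | cons b t' =>
        have hmem : a ∈ b :: t' := List.count_pos_iff.mp (by omega)
        have hba : b = a := by
          have h1 : a ≤ b := ha b (by simp)
          have h2 : b ≤ a := by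
            rcases List.mem_cons.mp hmem with h | h
            · exact h.symm.le
            · exact (List.pairwise_cons.mp ht).1 a h
          exact le_antisymm h2 h1
        subst hba
        have hct' : 1 ≤ List.count b t' := by
          rw [List.count_cons_self] at hct; omega
        cases t' with
        | nil => simp at hct'
        | cons c t'' =>
          have hmem' : b ∈ c :: t'' := List.count_pos_iff.mp (by omega)
          have hcb : c = b := by
            have h1 : b ≤ c := ha c (by simp)
            have h2 : c ≤ b := by
              rcases List.mem_cons.mp hmem' with h | h
              · exact h.symm.le
              · exact (List.pairwise_cons.mp (List.pairwise_cons.mp ht).2).1 b h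
            exact le_antisymm h2 h1
          subst hcb
          simp [hasTrip]
    · have hct : 3 ≤ List.count x t := by
        rw [count_cons_ne x a t hax] at hc
        exact hc
      exact hasTrip_cons' a t (hasTrip_of_count t x ht hct)

theorem trip3_sorted (column : List String) :
    hasTrip (PySem.List.sorted column (fun x => x) false) = trip3 column := by
  have hperm : (PySem.List.sorted column (fun x => x) false).Perm column :=
    PySem.List.sorted_perm column (fun x => x) false
  rw [Bool.eq_iff_iff]
  constructor
  · intro h
    obtain ⟨x, hx, hc⟩ := count_of_hasTrip _ h
    simp only [trip3, List.any_eq_true, decide_eq_true_eq]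
    exact ⟨x, hperm.mem_iff.mp hx, by rw [← hperm.count_eq x]; exact hc⟩
  · intro h
    simp only [trip3, List.any_eq_true, decide_eq_true_eq] at h
    obtain ⟨x, hx, hc⟩ := h
    refine hasTrip_of_count _ x ?_ (by rw [hperm.count_eq x]; exact hc)
    exact PySem.List.sorted_pairwise column (fun x => x)

-- ---------- B's scan finds exactly a triple in the sorted list ----------
theorem bGo_eq : ∀ (t : List String) (p : String),
    (bGo t p 1 = if t.take 2 = [p, p] ∨ hasTrip t = true then "False" else "True") ∧
    (bGo t p 2 = if t.head? = some p ∨ hasTrip t = true then "False" else "True")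
  | [], p => by constructor <;> simp [bGo, hasTrip]
  | x :: t, p => by
    obtain ⟨ih1, ih2⟩ := bGo_eq t x
    constructor
    · by_cases hxp : x = p
      · subst hxp
        rw [show bGo (x :: t) x 1 = bGo t x 2 from by norm_num [bGo], ih2]
        refine if_congr ?_ rfl rfl
        have hx1 : (x :: t).take 2 = [x, x] ↔ t.head? = some x := by
          cases t <;> simp
        have hx2 : t.take 2 = [x, x] → t.head? = some x := by
          cases t with
          | nil => simp
          | cons c t' =>
            intro h
            simp only [List.take_succ_cons] at h
            injection h with h1 h2
            simp [h1]
        rw [hasTrip_cons_iff x t, hx1]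
        constructor
        · rintro (h | h)
          · exact Or.inl h
          · exact Or.inr (Or.inr h)
        · rintro (h | h | h)
          · exact Or.inl h
          · exact Or.inl (hx2 h)
          · exact Or.inr h
      · rw [show bGo (x :: t) p 1 = bGo t x 1 from by simp [bGo, hxp], ih1]
        refine if_congr ?_ rfl rfl
        rw [hasTrip_cons_iff x t]
        have hx3 : ¬ ((x :: t).take 2 = [p, p]) := by
          cases t <;> simp [hxp]
        constructor
        · intro h
          exact Or.inr h
        · rintro (h | h)
          · exact absurd h hx3
          · exact h
    · by_cases hxp : x = p
      · subst hxp
        rw [show bGo (x :: t) x 2 = "False" from by norm_num [bGo]]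
        rw [if_pos (Or.inl (by simp))]
      · rw [show bGo (x :: t) p 2 = bGo t x 1 from by simp [bGo, hxp], ih1]
        refine if_congr ?_ rfl rfl
        rw [hasTrip_cons_iff x t]
        constructor
        · intro h
          exact Or.inr h
        · rintro (h | h)
          · simp only [List.head?_cons, Option.some.injEq] at h
            exact absurd h hxp
          · exact h

theorem alt_eq_trip3 (column : List String) :
    informative_alt column = (if trip3 column = true then "False" else "True") := by
  cases hs : PySem.List.sorted column (fun x => x) false with
  | nil =>
    have h1 : informative_alt column = "True" := by
      unfold informative_alt
      rw [hs]
    have hperm : (PySem.List.sorted column (fun x => x) false).Perm column :=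
      PySem.List.sorted_perm column (fun x => x) false
    rw [hs] at hperm
    have hcol : column = [] := by
      cases column with
      | nil => rfl
      | cons a t => simpa using hperm.length_eq
    rw [h1]
    subst hcol
    simp [trip3]
  | cons p t =>
    have h1 : informative_alt column = bGo t p 1 := by
      unfold informative_alt
      rw [hs]
    rw [h1, (bGo_eq t p).1]
    refine if_congr ?_ rfl rfl
    rw [← hasTrip_cons_iff, ← hs, trip3_sorted]

-- ---------- A computes the same characterisation ----------
theorem count_drop (l : List String) (k : ℕ) (hk : k + 1 ≤ l.length) (v : String) :
    (List.range (l.length - (k + 1))).countP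
      (fun j => decide (v = l.getD (l.length - (j + 1)) "")) =
      (l.drop (k + 1)).count v := by
  have hmap : (List.range (l.length - (k + 1))).map (fun j => l.getD (l.length - (j + 1)) "") =
      (l.drop (k + 1)).reverse := by
    apply List.ext_getElem
    · simp
    · intro j h1 h2
      simp only [List.length_map, List.length_range] at h1
      simp only [List.getElem_map, List.getElem_range, List.getElem_reverse, List.getElem_drop]
      rw [List.getD_eq_getElem l "" (by omega)]
      congr 1
      simp only [List.length_drop] at h2 ⊢
      omega
  calc (List.range (l.length - (k + 1))).countP
        (fun j => decide (v = l.getD (l.length - (j + 1)) ""))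
      = ((List.range (l.length - (k + 1))).map
          (fun j => l.getD (l.length - (j + 1)) "")).countP (· == v) := by
        rw [List.countP_map]
        apply List.countP_congr
        intro a _
        simp only [Function.comp_apply, decide_eq_true_eq, beq_iff_eq]
        exact eq_comm
    _ = ((l.drop (k + 1)).reverse).countP (· == v) := by rw [hmap]
    _ = ((l.drop (k + 1)).reverse).count v := rfl
    _ = (l.drop (k + 1)).count v := List.count_reverse

theorem cond_iff (l : List String) :
    (∃ k : ℕ, k + 1 < l.length ∧ 2 ≤ (l.drop (k + 1)).count (l.getD k "")) ↔
      (∃ x ∈ l, 3 ≤ l.count x) := by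
  constructor
  · rintro ⟨k, hk, hc⟩
    induction l generalizing k with
    | nil => simp at hk
    | cons a t ih =>
      cases k with
      | zero =>
        simp only [List.drop_succ_cons, List.drop_zero, List.getD_cons_zero] at hc
        refine ⟨a, by simp, ?_⟩
        rw [List.count_cons_self]
        omega
      | succ k' =>
        simp only [List.drop_succ_cons, List.getD_cons_succ] at hc
        obtain ⟨x, hx, hcx⟩ := ih k' (by simp at hk ⊢; omega) hc
        exact ⟨x, by simp [hx], le_trans hcx (count_cons_le x a t)⟩
  · rintro ⟨x, hx, hc⟩
    induction l with
    | nil => simp at hx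
    | cons a t ih =>
      by_cases hax : a = x
      · subst hax
        have hct : 2 ≤ List.count a t := by
          rw [List.count_cons_self] at hc; omega
        refine ⟨0, ?_, ?_⟩
        · have h2 : 2 ≤ t.length := le_trans hct (List.count_le_length)
          simp
          omega
        · simpa using hct
      · have hxt : x ∈ t := by
          rcases List.mem_cons.mp hx with h | h
          · exact absurd h.symm hax
          · exact h
        have hct : 3 ≤ List.count x t := by
          rw [count_cons_ne x a t hax] at hc
          exact hc
        obtain ⟨k, hk, hck⟩ := ih hxt hct
        exact ⟨k + 1, by simp; omega, by simpa using hck⟩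

theorem a_eq_trip3 (column : List String) :
    informative column = (if trip3 column = true then "False" else "True") := by
  by_cases hnil : column = []
  · subst hnil
    decide
  · have hlen : 1 ≤ column.length := List.length_pos_iff.mpr hnil
    have hg : ∀ k : ℕ, k + 1 ≤ column.length →
        ((PySem.List.pyRange 0 ((column.length : ℤ) - ((k : ℤ) + 1)) 1).foldl
          (fun acc y =>
            if PySem.List.pyGetD column ((k : ℤ)) "" = PySem.List.pyGetD column (-(y + 1)) ""
            then acc + 1 else acc) 0)
        = (((column.drop (k + 1)).count (column.getD k "") : ℕ) : ℤ) := by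
      intro k hk
      rw [PySem.List.foldl_ite_add_one]
      rw [show ((column.length : ℤ) - ((k : ℤ) + 1)) = (((column.length - (k + 1) : ℕ)) : ℤ)
        from by rw [Nat.cast_sub hk]; push_cast; ring]
      rw [PySem.List.pyRange_zero_nat]
      rw [List.countP_map, zero_add]
      have hcongr : ∀ j ∈ List.range (column.length - (k + 1)),
          (((fun y => decide (PySem.List.pyGetD column ((k : ℤ)) "" =
              PySem.List.pyGetD column (-(y + 1)) "")) ∘ (fun (m : ℕ) => (m : ℤ))) j = true) ↔
          ((fun j : ℕ => decide (column.getD k "" =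
              column.getD (column.length - (j + 1)) "")) j = true) := by
        intro j hj
        simp only [List.mem_range] at hj
        simp only [Function.comp_apply, decide_eq_true_eq]
        rw [show (-((j : ℤ) + 1)) = -(((j + 1 : ℕ)) : ℤ) from by push_cast; ring]
        rw [PySem.List.pyGetD_neg_natCast column (j + 1) "" (by omega) (by omega)]
        rw [PySem.List.pyGetD_natCast]
        rw [List.getD_eq_getElem column "" (show k < column.length by omega)]
        rw [List.getD_eq_getElem column ""
          (show column.length - (j + 1) < column.length by omega)]
      rw [List.countP_congr hcongr]
      rw [count_drop column k hk (column.getD k "")]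
    have h0 : informative column =
        aLoop ((PySem.List.pyRange 0 ((column.length : ℤ) - 1) 1).map
          (fun i => PySem.Int.toStr
            ((PySem.List.pyRange 0 ((column.length : ℤ) - (i + 1)) 1).foldl
              (fun acc y =>
                if PySem.List.pyGetD column i "" = PySem.List.pyGetD column (-(y + 1)) ""
                then acc + 1 else acc) 0))) := by
      simp only [informative, PySem.List.len_eq]
      rw [PySem.List.foldl_append_singleton_eq_map]
      rw [List.nil_append]
    rw [h0]
    rw [show ((column.length : ℤ) - 1) = (((column.length - 1 : ℕ)) : ℤ) from by
      rw [Nat.cast_sub hlen]; simp]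
    rw [PySem.List.pyRange_zero_nat]
    rw [List.map_map]
    have hfg : ∀ j ∈ List.range (column.length - 1),
        ((fun i => PySem.Int.toStr
            ((PySem.List.pyRange 0 ((column.length : ℤ) - (i + 1)) 1).foldl
              (fun acc y =>
                if PySem.List.pyGetD column i "" = PySem.List.pyGetD column (-(y + 1)) ""
                then acc + 1 else acc) 0)) ∘ (fun (k : ℕ) => (k : ℤ))) j
          = PySem.Int.toStr ((((column.drop (j + 1)).count (column.getD j "") : ℕ)) : ℤ) := by
      intro j hj
      simp only [Function.comp_apply]
      rw [hg j (by simp only [List.mem_range] at hj; omega)]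
    rw [List.map_congr_left hfg]
    rw [aLoop_map (List.range (column.length - 1))
      (fun j => (column.drop (j + 1)).count (column.getD j ""))]
    refine if_congr ?_ rfl rfl
    have hEx : (∃ j ∈ List.range (column.length - 1),
        2 ≤ (column.drop (j + 1)).count (column.getD j "")) ↔
        (∃ x ∈ column, 3 ≤ column.count x) := by
      rw [← cond_iff]
      constructor
      · rintro ⟨j, hj, h2⟩
        exact ⟨j, by simp only [List.mem_range] at hj; omega, h2⟩
      · rintro ⟨k, hk, h2⟩
        exact ⟨k, by simp only [List.mem_range]; omega, h2⟩
    rw [hEx]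
    simp [trip3, List.any_eq_true]

-- ===== VERDICT (by name: the statement is the Claim_ definition above) =====
theorem informative_spec : Claim_equal_informative := by
  intro column _
  unfold Spec_informative
  rw [a_eq_trip3, alt_eq_trip3]
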